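-- pv_equiv track=rewrite | github.com/jzanetti/matsim-vis | process/network.py | get_accumulated_traffic
-- ===== SOURCE A (Python) =====
-- from copy import deepcopy
--
-- def get_accumulated_traffic(link_density: dict) -> dict:
--     """Get accumulated traffic load
--
--     Args:
--         link_density (dict): link density in a dict
--
--     Returns:
--         dict: accumulated density
--     """
--     all_traffic_ts = sorted(list(link_density.keys()))
--     all_link_names = list(link_density[all_traffic_ts[0]].keys())
--     accum_link_density = deepcopy(link_density)
--     for i, proc_t in enumerate(all_traffic_ts):
--         if i > 0:
--             for proc_link_name in all_link_names:
--                 accum_link_density[proc_t][proc_link_name] += accum_link_density[all_traffic_ts[i - 1]][proc_link_name]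
--
--     return accum_link_density
-- ===== SOURCE B (Python) =====
-- from copy import deepcopy
--
--
-- def get_accumulated_traffic(link_density: dict) -> dict:
--     """Get accumulated traffic load (link-major running prefix sums)."""
--     all_traffic_ts = sorted(link_density)
--     accum_link_density = deepcopy(link_density)
--     for proc_link_name in link_density[all_traffic_ts[0]]:
--         running = 0
--         for proc_t in all_traffic_ts:
--             running += link_density[proc_t][proc_link_name]
--             accum_link_density[proc_t][proc_link_name] = running
--     return accum_link_density
-- ===== Notes on version B (the rewrite author's own statement) =====
-- stated objective: simpler
-- what changed: B inverts the loop nesting to link-major and replaces A's in-place time-major accumulation (accum[t][link] += accum[prev_t][link], with enumerate/index lookups of the previous timestep) by a running prefix-sum accumulator read off the original densities and written back with plain assignment.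
import Mathlib
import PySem

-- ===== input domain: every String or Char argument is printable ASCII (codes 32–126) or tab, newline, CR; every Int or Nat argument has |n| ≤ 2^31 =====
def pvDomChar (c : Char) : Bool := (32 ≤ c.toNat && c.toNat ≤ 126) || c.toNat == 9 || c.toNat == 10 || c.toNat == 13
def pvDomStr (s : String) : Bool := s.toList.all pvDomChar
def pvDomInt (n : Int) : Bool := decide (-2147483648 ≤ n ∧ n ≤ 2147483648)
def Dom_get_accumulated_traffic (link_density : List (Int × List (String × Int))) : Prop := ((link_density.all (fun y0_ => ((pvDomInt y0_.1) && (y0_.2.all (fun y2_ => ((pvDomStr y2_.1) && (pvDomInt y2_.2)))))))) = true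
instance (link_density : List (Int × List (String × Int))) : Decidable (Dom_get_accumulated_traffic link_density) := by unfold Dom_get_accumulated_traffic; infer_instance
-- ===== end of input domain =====

-- B re-implements the accumulation link-major with a running prefix sum read off the original
-- densities (A is timestep-major and accumulates in place); same cost, simpler decomposition.
-- ===== PORT A =====

def pvToD (ld : List (Int × List (String × Int))) : PySem.Dict Int (PySem.Dict String Int) :=
  PySem.Dict.ofList (ld.map (fun p => (p.1, PySem.Dict.ofList p.2)))

def get_accumulated_traffic (link_density : List (Int × List (String × Int))) : List (Int × List (String × Int)) :=
  let d := pvToD link_density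
  let all_traffic_ts := PySem.List.sorted d.keys (fun x => x) false
  match PySem.List.pyGet? all_traffic_ts 0 with
  | none => []   -- Python raises IndexError here (empty dict); excluded by Pre_
  | some t0 =>
    let all_link_names := (d.getD t0 PySem.Dict.empty).keys
    let accum := (PySem.List.enumerate all_traffic_ts).foldl (fun acc it =>
        if it.1 > 0 then
          all_link_names.foldl (fun acc2 l =>
            acc2.modify it.2 PySem.Dict.empty (fun inn =>
              inn.insert l (inn.getD l 0 +
                (acc2.getD ((PySem.List.pyGet? all_traffic_ts (it.1 - 1)).getD 0) PySem.Dict.empty).getD l 0))) acc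
        else acc) d
    accum.items.map (fun p => (p.1, p.2.items))

def get_accumulated_traffic_alt (link_density : List (Int × List (String × Int))) : List (Int × List (String × Int)) :=
  let d := pvToD link_density
  let all_traffic_ts := PySem.List.sorted d.keys (fun x => x) false
  match PySem.List.pyGet? all_traffic_ts 0 with
  | none => []   -- Python raises IndexError here (empty dict); excluded by Pre_
  | some t0 =>
    let accum := ((d.getD t0 PySem.Dict.empty).keys).foldl (fun acc l =>
        (all_traffic_ts.foldl
          (fun (p : PySem.Dict Int (PySem.Dict String Int) × Int) t =>
            let running := p.2 + (d.getD t PySem.Dict.empty).getD l 0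
            (p.1.modify t PySem.Dict.empty (fun inn => inn.insert l running), running))
          (acc, 0)).1) d
    accum.items.map (fun p => (p.1, p.2.items))

-- Pre_ = exactly the inputs where Python A (and B) return normally: a non-empty dict whose
-- first-timestep link names occur at every timestep (otherwise IndexError/KeyError is raised).
-- The Lean ports are total (PySem getD defaults), so the equivalence proof itself holds on all
-- inputs and does not need Pre_'s hypotheses; Pre_ delimits faithfulness to the raising Pythons.
def Pre_get_accumulated_traffic (link_density : List (Int × List (String × Int))) : Prop :=
  let d := pvToD link_density
  d.items ≠ [] ∧
  ∀ t ∈ d.keys,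
    ∀ l ∈ (d.getD ((PySem.List.min? d.keys (fun x => x)).getD 0) PySem.Dict.empty).keys,
      (d.getD t PySem.Dict.empty).contains l = true

instance (link_density : List (Int × List (String × Int))) : Decidable (Pre_get_accumulated_traffic link_density) := by unfold Pre_get_accumulated_traffic; infer_instance


def pvWitness_get_accumulated_traffic : (List (Int × List (String × Int))) :=
  [(1, [("a", 3), ("b", 1)]), (0, [("a", 1), ("b", 5)]), (2, [("a", 2), ("b", 1), ("c", 9)])]

def Spec_get_accumulated_traffic (link_density : List (Int × List (String × Int))) (out : List (Int × List (String × Int))) : Prop := out = get_accumulated_traffic_alt link_density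
instance (link_density : List (Int × List (String × Int))) (out : List (Int × List (String × Int))) : Decidable (Spec_get_accumulated_traffic link_density out) := by unfold Spec_get_accumulated_traffic; infer_instance

-- ===== CLAIM (what is proved, stated in full; the proofs are below) =====
def Claim_equal_get_accumulated_traffic : Prop := ∀ (link_density : List (Int × List (String × Int))), Dom_get_accumulated_traffic link_density → Pre_get_accumulated_traffic link_density → Spec_get_accumulated_traffic link_density (get_accumulated_traffic link_density)

-- ===== LEMMAS AND PROOFS =====

def MpL (its : List (Int × PySem.Dict String Int)) (G : Int → PySem.Dict String Int) :
    List (Int × PySem.Dict String Int) := its.map (fun p => (p.1, G p.1))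

def Mp (its : List (Int × PySem.Dict String Int)) (G : Int → PySem.Dict String Int) :
    PySem.Dict Int (PySem.Dict String Int) := ⟨MpL its G⟩

def keysL (its : List (Int × PySem.Dict String Int)) : List Int := its.map Prod.fst

def updF (G : Int → PySem.Dict String Int) (t : Int) (w : PySem.Dict String Int) :
    Int → PySem.Dict String Int := fun s => if s = t then w else G s

theorem get?_Mp (its : List (Int × PySem.Dict String Int)) (G : Int → PySem.Dict String Int)
    (t : Int) : (Mp its G).get? t = if t ∈ keysL its then some (G t) else none := by
  induction its with
  | nil => simp [Mp, MpL, keysL, PySem.Dict.get?]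
  | cons p rest ih =>
    have : (Mp (p :: rest) G) = ⟨(p.1, G p.1) :: MpL rest G⟩ := rfl
    rw [this, PySem.Dict.get?_mk_cons]
    by_cases h : p.1 = t
    · subst h; simp [keysL]
    · have : (p.1 == t) = false := by simp [h]
      simp only [this, Bool.false_eq_true, if_false]
      have := ih
      simp [Mp] at this
      rw [this]
      simp only [keysL]
      by_cases hm : t ∈ List.map Prod.fst rest
      · simp [hm]
      · simp [hm, Ne.symm h]

theorem getD_Mp (its : List (Int × PySem.Dict String Int)) (G : Int → PySem.Dict String Int)
    (t : Int) (dflt : PySem.Dict String Int) (h : t ∈ keysL its) :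
    (Mp its G).getD t dflt = G t := by
  simp [PySem.Dict.getD, get?_Mp, h]

theorem contains_Mp (its : List (Int × PySem.Dict String Int)) (G : Int → PySem.Dict String Int)
    (t : Int) (h : t ∈ keysL its) : (Mp its G).contains t = true := by
  rw [PySem.Dict.contains_eq_isSome_get?, get?_Mp]
  simp [h]

theorem modify_Mp (its : List (Int × PySem.Dict String Int)) (G : Int → PySem.Dict String Int)
    (t : Int) (dflt : PySem.Dict String Int) (f : PySem.Dict String Int → PySem.Dict String Int)
    (h : t ∈ keysL its) :
    (Mp its G).modify t dflt f = Mp its (updF G t (f (G t))) := by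
  show (Mp its G).insert t (f ((Mp its G).getD t dflt)) = _
  rw [getD_Mp its G t dflt h]
  have hc : (Mp its G).contains t = true := contains_Mp its G t h
  apply PySem.Dict.ext
  show ((Mp its G).insert t (f (G t))).items = MpL its (updF G t (f (G t)))
  rw [PySem.Dict.items_insert_of_contains _ _ hc]
  show (MpL its G).map _ = _
  simp only [MpL, List.map_map]
  apply List.map_congr_left
  intro p _
  by_cases hp : p.1 = t
  · simp [Function.comp, hp, updF]
  · simp [Function.comp, hp, updF]

theorem getD_foldl_insert_fun (xs : List String) (vv : String → Int)
    (inn : PySem.Dict String Int) (l : String) :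
    (xs.foldl (fun m x => m.insert x (vv x)) inn).getD l 0
      = if l ∈ xs then vv l else inn.getD l 0 := by
  induction xs generalizing inn with
  | nil => simp
  | cons h t ih =>
    simp only [List.foldl_cons, ih, List.mem_cons]
    by_cases hm : l ∈ t
    · simp [hm]
    · by_cases he : l = h
      · subst he; simp [hm, PySem.Dict.getD_insert_self]
      · simp [hm, he, PySem.Dict.getD_insert_of_ne _ _ _ he]

theorem insert_eq_self (d : PySem.Dict String Int) (k : String) (v : Int)
    (hnd : d.keys.Nodup) (h : d.get? k = some v) : d.insert k v = d := by
  have hc : d.contains k = true := by rw [PySem.Dict.contains_eq_isSome_get?, h]; rfl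
  apply PySem.Dict.ext
  rw [PySem.Dict.items_insert_of_contains _ _ hc]
  have : ∀ p ∈ d.items, (if (p.1 == k) = true then (k, v) else p) = p := by
    intro p hp
    by_cases hpk : p.1 = k
    · have h2 : d.get? p.1 = some p.2 := by
        apply PySem.Dict.get?_of_mem_items
        · exact (Prod.mk.eta ▸ hp)
        · exact hnd
      rw [hpk] at h2; rw [h] at h2
      simp only [hpk, beq_self_eq_true, if_true]
      have : v = p.2 := by injection h2
      rw [this, ← hpk]
    · simp [hpk]
  calc (d.items.map fun p => if (p.1 == k) = true then (k, v) else p)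
      = d.items.map id := List.map_congr_left this
    _ = d.items := List.map_id _

theorem foldl_insert_id (xs : List String) (inn : PySem.Dict String Int) (vv : String → Int)
    (hnd : inn.keys.Nodup) (h : ∀ l ∈ xs, inn.get? l = some (vv l)) :
    xs.foldl (fun m l => m.insert l (vv l)) inn = inn := by
  induction xs with
  | nil => rfl
  | cons a t ih =>
    simp only [List.foldl_cons]
    rw [insert_eq_self inn a (vv a) hnd (h a (by simp))]
    exact ih (fun l hl => h l (by simp [hl]))

theorem foldl_insert_read (xs : List String) (hnd : xs.Nodup) (c w : String → Int) :
    ∀ (inn : PySem.Dict String Int), (∀ l ∈ xs, inn.getD l 0 = w l) →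
    xs.foldl (fun m l => m.insert l (m.getD l 0 + c l)) inn
      = xs.foldl (fun m l => m.insert l (w l + c l)) inn := by
  induction xs with
  | nil => intro inn _; rfl
  | cons a t ih =>
    intro inn hw
    simp only [List.foldl_cons]
    rw [hw a (by simp)]
    refine ih hnd.of_cons _ ?_
    intro l hl
    have hla : l ≠ a := by rintro rfl; exact (List.nodup_cons.mp hnd).1 hl
    rw [PySem.Dict.getD_insert_of_ne _ _ _ hla]
    exact hw l (by simp [hl])

theorem takeWhile_ne_append (pre : List Int) (t : Int) (suf : List Int)
    (h : ∀ u ∈ pre, u ≠ t) :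
    (pre ++ t :: suf).takeWhile (fun u => u != t) = pre := by
  induction pre with
  | nil => simp
  | cons a r ih =>
    have ha : (a != t) = true := by simp [h a (by simp)]
    simp only [List.cons_append, List.takeWhile_cons, ha, if_true]
    rw [ih (fun u hu => h u (by simp [hu]))]

def valT (d : PySem.Dict Int (PySem.Dict String Int)) (ts : List Int) (s : Int) (l : String) : Int :=
  ((ts.takeWhile (fun u => u != s)).map (fun u => (d.getD u PySem.Dict.empty).getD l 0)).sum
    + (d.getD s PySem.Dict.empty).getD l 0

def updT (d : PySem.Dict Int (PySem.Dict String Int)) (ts : List Int) (links : List String)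
    (s : Int) : PySem.Dict String Int :=
  links.foldl (fun inn l => inn.insert l (valT d ts s l)) (d.getD s PySem.Dict.empty)

theorem valT_split (d : PySem.Dict Int (PySem.Dict String Int)) (pre : List Int) (s : Int)
    (suf : List Int) (l : String) (hn : ∀ u ∈ pre, u ≠ s) :
    valT d (pre ++ s :: suf) s l
      = (pre.map (fun u => (d.getD u PySem.Dict.empty).getD l 0)).sum
        + (d.getD s PySem.Dict.empty).getD l 0 := by
  unfold valT
  rw [takeWhile_ne_append pre s suf hn]

theorem valT_head (d : PySem.Dict Int (PySem.Dict String Int)) (ts : List Int) (t0 : Int)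
    (l : String) (h : ts.head? = some t0) :
    valT d ts t0 l = (d.getD t0 PySem.Dict.empty).getD l 0 := by
  cases ts with
  | nil => simp at h
  | cons a rest =>
    have : a = t0 := by simpa using h
    subst this
    have := valT_split d [] a rest l (by simp)
    simpa using this

theorem innerA (its : List (Int × PySem.Dict String Int)) (t prevt : Int)
    (ht : t ∈ keysL its) (hp : prevt ∈ keysL its) (hne : prevt ≠ t) :
    ∀ (xs : List String) (G : Int → PySem.Dict String Int),
    xs.foldl (fun acc2 l =>
        acc2.modify t PySem.Dict.empty (fun inn =>
          inn.insert l (inn.getD l 0 +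
            (acc2.getD prevt PySem.Dict.empty).getD l 0))) (Mp its G)
      = Mp its (updF G t (xs.foldl
          (fun inn l => inn.insert l (inn.getD l 0 + (G prevt).getD l 0)) (G t))) := by
  intro xs
  induction xs with
  | nil =>
    intro G
    simp only [List.foldl_nil]
    congr 1
    funext s
    unfold updF
    by_cases hs : s = t
    · subst hs; simp
    · simp [hs]
  | cons a rest ih =>
    intro G
    simp only [List.foldl_cons]
    rw [getD_Mp its G prevt _ hp, modify_Mp its G t _ _ ht]
    rw [ih (updF G t ((G t).insert a ((G t).getD a 0 + (G prevt).getD a 0)))]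
    congr 1
    have h1 : updF G t ((G t).insert a ((G t).getD a 0 + (G prevt).getD a 0)) prevt = G prevt := by
      unfold updF; simp [hne]
    have h2 : updF G t ((G t).insert a ((G t).getD a 0 + (G prevt).getD a 0)) t
        = (G t).insert a ((G t).getD a 0 + (G prevt).getD a 0) := by
      unfold updF; simp
    rw [h1, h2]
    funext s
    unfold updF
    by_cases hs : s = t <;> simp [hs]

theorem Amain (d : PySem.Dict Int (PySem.Dict String Int)) (ts : List Int) (links : List String)
    (hnd : ts.Nodup) (hlnd : links.Nodup)
    (hsub : ∀ t ∈ ts, t ∈ keysL d.items) (t0 : Int) (ht0 : ts.head? = some t0) :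
    ∀ (suf pre : List Int) (G : Int → PySem.Dict String Int),
    ts = pre ++ suf → pre ≠ [] →
    (∀ s, G s = if s ∈ pre ∧ s ≠ t0 then updT d ts links s else d.getD s PySem.Dict.empty) →
    ∃ G', (PySem.List.enumerate suf (pre.length : Int)).foldl
        (fun acc it => if it.1 > 0 then
          links.foldl (fun acc2 l =>
            acc2.modify it.2 PySem.Dict.empty (fun inn =>
              inn.insert l (inn.getD l 0 +
                (acc2.getD ((PySem.List.pyGet? ts (it.1 - 1)).getD 0)
                  PySem.Dict.empty).getD l 0))) acc
         else acc) (Mp d.items G)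
      = Mp d.items G'
    ∧ (∀ s, G' s = if s ∈ pre ++ suf ∧ s ≠ t0 then updT d ts links s
        else d.getD s PySem.Dict.empty) := by
  intro suf
  induction suf with
  | nil =>
    intro pre G hts hpre hInv
    refine ⟨G, rfl, ?_⟩
    simpa using hInv
  | cons t suf2 ih =>
    intro pre G hts hpre hInv
    -- facts about positions
    obtain ⟨pre2, pl, rfl⟩ : ∃ as a, pre = as ++ [a] := by
      rcases List.eq_nil_or_concat pre with h | ⟨l', b, h⟩
      · exact absurd h hpre
      · exact ⟨l', b, by simpa [List.concat_eq_append] using h⟩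
    have hlen : ((pre2 ++ [pl]).length : Int) = (pre2.length : Int) + 1 := by
      simp
    have hpos : ((pre2 ++ [pl]).length : Int) > 0 := by omega
    -- prev timestep lookup
    have hprev : (PySem.List.pyGet? ts (((pre2 ++ [pl]).length : Int) - 1)).getD 0 = pl := by
      have h1 : ((pre2 ++ [pl]).length : Int) - 1 = ((pre2.length : Nat) : Int) := by omega
      rw [h1, PySem.List.pyGet?_natCast]
      have : ts = pre2 ++ (pl :: (t :: suf2)) := by
        rw [hts]; simp
      rw [this, List.getElem?_append_right (le_refl _)]
      simp
    -- t not in pre, t ≠ t0, pl ∈ pre etc.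
    have hnd' := hnd
    rw [hts] at hnd'
    have htpre : t ∉ pre2 ++ [pl] := by
      intro hmem
      have := List.disjoint_of_nodup_append hnd'
      exact this hmem (by simp)
    have ht0pre : t0 ∈ pre2 ++ [pl] := by
      have : ts.head? = ((pre2 ++ [pl]) ++ t :: suf2).head? := by rw [hts]
      rw [this] at ht0
      rcases pre2 with _ | ⟨a, r⟩
      · simp at ht0; simp [ht0]
      · simp at ht0; simp [ht0]
    have htne : t ≠ t0 := fun h => htpre (h ▸ ht0pre)
    -- enumerate unfold and first step
    have henum : PySem.List.enumerate (t :: suf2) ((pre2 ++ [pl]).length : Int)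
        = (((pre2 ++ [pl]).length : Int), t) :: PySem.List.enumerate suf2 (((pre2 ++ [pl]).length : Int) + 1) := rfl
    rw [henum, List.foldl_cons]
    simp only [hpos, if_true, hprev]
    -- inner fold
    have htk : t ∈ keysL d.items := hsub t (by rw [hts]; simp)
    have hplk : pl ∈ keysL d.items := hsub pl (by rw [hts]; simp)
    have hplne : pl ≠ t := by
      intro h; exact htpre (by simp [h])
    rw [innerA d.items t pl htk hplk hplne links G]
    -- normalize the inner fold value
    have hGt : G t = d.getD t PySem.Dict.empty := by
      rw [hInv t, if_neg]
      rintro ⟨h1, _⟩; exact htpre h1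
    have hcval : ∀ l ∈ links, (G pl).getD l 0 = valT d ts pl l := by
      intro l hl
      by_cases hplt0 : pl = t0
      · rw [hInv pl, if_neg (by rintro ⟨_, h2⟩; exact h2 hplt0)]
        rw [hplt0, valT_head d ts t0 l ht0]
      · rw [hInv pl, if_pos ⟨by simp, hplt0⟩]
        unfold updT
        rw [getD_foldl_insert_fun links _ _ l, if_pos hl]
    have hW : links.foldl (fun inn l => inn.insert l (inn.getD l 0 + (G pl).getD l 0)) (G t)
        = updT d ts links t := by
      rw [hGt]
      rw [foldl_insert_read links hlnd (fun l => (G pl).getD l 0)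
        (fun l => (d.getD t PySem.Dict.empty).getD l 0) _ (fun l _ => rfl)]
      unfold updT
      apply PySem.List.foldl_congr_mem
      intro acc l hl
      congr 1
      rw [hcval l hl]
      -- (d.getD t ∅).getD l 0 + valT d ts pl l = valT d ts t l
      have e1 : valT d ts pl l
          = ((pre2.map (fun u => (d.getD u PySem.Dict.empty).getD l 0)).sum
            + (d.getD pl PySem.Dict.empty).getD l 0) := by
        have hts2 : ts = pre2 ++ pl :: (t :: suf2) := by rw [hts]; simp
        rw [hts2]
        apply valT_split
        intro u hu
        have hnd2 := hnd
        rw [hts2] at hnd2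
        intro he
        exact (List.disjoint_of_nodup_append hnd2) hu (by simp [he])
      have e2 : valT d ts t l
          = (((pre2 ++ [pl]).map (fun u => (d.getD u PySem.Dict.empty).getD l 0)).sum
            + (d.getD t PySem.Dict.empty).getD l 0) := by
        rw [hts]
        apply valT_split
        intro u hu he
        exact htpre (he ▸ hu)
      rw [e1, e2]
      simp
      omega
    rw [hW]
    -- recurse
    have hts3 : ts = ((pre2 ++ [pl]) ++ [t]) ++ suf2 := by rw [hts]; simp
    have hInv' : ∀ s, updF G t (updT d ts links t) s
        = if s ∈ (pre2 ++ [pl]) ++ [t] ∧ s ≠ t0 then updT d ts links s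
          else d.getD s PySem.Dict.empty := by
      intro s
      unfold updF
      by_cases hs : s = t
      · subst hs; simp [htne]
      · rw [if_neg hs, hInv s]
        have : (s ∈ (pre2 ++ [pl]) ++ [t]) ↔ (s ∈ pre2 ++ [pl]) := by simp [hs]
        simp only [this]
    obtain ⟨G', hfold, hchar⟩ := ih ((pre2 ++ [pl]) ++ [t]) (updF G t (updT d ts links t))
      hts3 (by simp) hInv'
    have hlen2 : (((pre2 ++ [pl]) ++ [t]).length : Int) = ((pre2 ++ [pl]).length : Int) + 1 := by
      rw [List.length_append]
      simp
    rw [← hlen2]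
    refine ⟨G', hfold, ?_⟩
    intro s
    rw [hchar s]
    have : (s ∈ ((pre2 ++ [pl]) ++ [t]) ++ suf2) ↔ (s ∈ (pre2 ++ [pl]) ++ t :: suf2) := by
      simp only [List.mem_append, List.mem_cons]; tauto
    simp only [this]

theorem Bpass (d : PySem.Dict Int (PySem.Dict String Int)) (ts : List Int) (l : String)
    (hnd : ts.Nodup) (hsub : ∀ t ∈ ts, t ∈ keysL d.items) :
    ∀ (suf pre : List Int) (G : Int → PySem.Dict String Int),
    ts = pre ++ suf →
    ∃ G', (suf.foldl (fun p t =>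
        (p.1.modify t PySem.Dict.empty
            (fun inn => inn.insert l (p.2 + (d.getD t PySem.Dict.empty).getD l 0)),
          p.2 + (d.getD t PySem.Dict.empty).getD l 0))
        (Mp d.items G, (pre.map (fun u => (d.getD u PySem.Dict.empty).getD l 0)).sum)).1
      = Mp d.items G'
    ∧ (∀ s, G' s = if s ∈ suf then (G s).insert l (valT d ts s l) else G s) := by
  intro suf
  induction suf with
  | nil =>
    intro pre G hts
    exact ⟨G, rfl, by simp⟩
  | cons t suf2 ih =>
    intro pre G hts
    simp only [List.foldl_cons]
    have htk : t ∈ keysL d.items := hsub t (by rw [hts]; simp)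
    have hrun : (pre.map (fun u => (d.getD u PySem.Dict.empty).getD l 0)).sum
          + (d.getD t PySem.Dict.empty).getD l 0
        = ((pre ++ [t]).map (fun u => (d.getD u PySem.Dict.empty).getD l 0)).sum := by
      simp
    have hval : (pre.map (fun u => (d.getD u PySem.Dict.empty).getD l 0)).sum
          + (d.getD t PySem.Dict.empty).getD l 0 = valT d ts t l := by
      have hn : ∀ u ∈ pre, u ≠ t := by
        intro u hu he
        have hnd2 := hnd
        rw [hts] at hnd2
        exact (List.disjoint_of_nodup_append hnd2) hu (by simp [he])
      rw [hts, valT_split d pre t suf2 l hn]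
    rw [modify_Mp d.items G t _ _ htk]
    rw [hval]
    have hts2 : ts = (pre ++ [t]) ++ suf2 := by rw [hts]; simp
    obtain ⟨G', hfold, hchar⟩ := ih (pre ++ [t])
      (updF G t ((G t).insert l (valT d ts t l))) hts2
    rw [← hrun, hval] at hfold
    refine ⟨G', hfold, ?_⟩
    intro s
    rw [hchar s]
    have htns : t ∉ suf2 := by
      have hnd2 := hnd
      rw [hts] at hnd2
      have := (List.nodup_append.mp hnd2).2.1
      exact (List.nodup_cons.mp this).1
    by_cases hs : s = t
    · subst hs
      simp only [htns, if_false, List.mem_cons, true_or, if_true]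
      unfold updF; simp
    · unfold updF
      simp only [hs, if_false]
      have : (s ∈ t :: suf2) ↔ (s ∈ suf2) := by simp [hs]
      simp only [this]

theorem Bmain (d : PySem.Dict Int (PySem.Dict String Int)) (ts : List Int)
    (hnd : ts.Nodup) (hsub : ∀ t ∈ ts, t ∈ keysL d.items) :
    ∀ (ls : List String) (G : Int → PySem.Dict String Int),
    ∃ G', (ls.foldl (fun acc l =>
        (ts.foldl (fun p t =>
          (p.1.modify t PySem.Dict.empty
              (fun inn => inn.insert l (p.2 + (d.getD t PySem.Dict.empty).getD l 0)),
            p.2 + (d.getD t PySem.Dict.empty).getD l 0))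
          (acc, 0)).1) (Mp d.items G))
      = Mp d.items G'
    ∧ (∀ s, G' s = if s ∈ ts then
        ls.foldl (fun inn l => inn.insert l (valT d ts s l)) (G s) else G s) := by
  intro ls
  induction ls with
  | nil =>
    intro G
    refine ⟨G, rfl, ?_⟩
    intro s; simp
  | cons l rest ih =>
    intro G
    simp only [List.foldl_cons]
    obtain ⟨G1, hfold1, hchar1⟩ := Bpass d ts l hnd hsub ts [] G (by simp)
    have h0 : ((([] : List Int)).map (fun u => (d.getD u PySem.Dict.empty).getD l 0)).sum = 0 := rfl
    rw [h0] at hfold1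
    rw [hfold1]
    obtain ⟨G', hfold, hchar⟩ := ih G1
    refine ⟨G', hfold, ?_⟩
    intro s
    rw [hchar s, hchar1 s]
    by_cases hs : s ∈ ts
    · simp [hs]
    · simp [hs]

theorem get?_mem_values {κ ν : Type} [BEq κ] (d : PySem.Dict κ ν) (k : κ) (v : ν)
    (h : d.get? k = some v) : v ∈ d.values := by
  unfold PySem.Dict.get? at h
  cases hf : d.items.find? (fun p => p.1 == k) with
  | none => rw [hf] at h; simp at h
  | some p =>
    rw [hf] at h
    simp at h
    have hmem := List.mem_of_find?_eq_some hf
    subst h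
    exact List.mem_map_of_mem hmem

theorem mem_values_foldl_insert {κ ν : Type} [BEq κ] [LawfulBEq κ] :
    ∀ (ps : List (κ × ν)) (d0 : PySem.Dict κ ν) (w : ν),
    w ∈ (ps.foldl (fun acc p => acc.insert p.1 p.2) d0).values →
    w ∈ d0.values ∨ w ∈ ps.map Prod.snd := by
  intro ps
  induction ps with
  | nil => intro d0 w h; exact Or.inl h
  | cons p rest ih =>
    intro d0 w h
    simp only [List.foldl_cons] at h
    rcases ih (d0.insert p.1 p.2) w h with h2 | h2
    · rcases PySem.Dict.mem_values_insert d0 p.1 p.2 w h2 with h3 | h3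
      · right; simp [h3]
      · left; exact h3
    · right; simp [h2]

theorem inner_nodup (ld : List (Int × List (String × Int))) (t : Int) :
    ((pvToD ld).getD t PySem.Dict.empty).keys.Nodup := by
  cases hg : (pvToD ld).get? t with
  | none =>
    rw [PySem.Dict.getD_of_get?_eq_none _ _ hg]
    simp [PySem.Dict.empty, PySem.Dict.keys]
  | some v =>
    rw [PySem.Dict.getD_of_get?_eq_some _ _ hg]
    have hv : v ∈ (pvToD ld).values := get?_mem_values _ _ _ hg
    unfold pvToD PySem.Dict.ofList PySem.Dict.update at hv
    rcases mem_values_foldl_insert _ _ _ hv with h | h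
    · simp [PySem.Dict.empty, PySem.Dict.values] at h
    · simp only [List.map_map, List.mem_map] at h
      obtain ⟨p, _, hp⟩ := h
      rw [← hp]
      exact PySem.Dict.nodup_keys_ofList _

theorem d_eq_Mp (d : PySem.Dict Int (PySem.Dict String Int)) (hnd : d.keys.Nodup) :
    d = Mp d.items (fun s => d.getD s PySem.Dict.empty) := by
  apply PySem.Dict.ext
  simp only [Mp, MpL]
  conv_lhs => rw [PySem.Dict.items_eq_map_keys d hnd PySem.Dict.empty]
  rw [PySem.Dict.items_eq_map_keys d hnd PySem.Dict.empty, List.map_map]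
  rfl

theorem A_drop_first (ts : List Int) (links : List String) (t0 : Int) (rest : List Int)
    (init : PySem.Dict Int (PySem.Dict String Int)) :
    (PySem.List.enumerate (t0 :: rest)).foldl
      (fun acc it => if it.1 > 0 then
        links.foldl (fun acc2 l =>
          acc2.modify it.2 PySem.Dict.empty (fun inn =>
            inn.insert l (inn.getD l 0 +
              (acc2.getD ((PySem.List.pyGet? ts (it.1 - 1)).getD 0)
                PySem.Dict.empty).getD l 0))) acc
       else acc) init
    = (PySem.List.enumerate rest 1).foldl
      (fun acc it => if it.1 > 0 then
        links.foldl (fun acc2 l =>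
          acc2.modify it.2 PySem.Dict.empty (fun inn =>
            inn.insert l (inn.getD l 0 +
              (acc2.getD ((PySem.List.pyGet? ts (it.1 - 1)).getD 0)
                PySem.Dict.empty).getD l 0))) acc
       else acc) init := by
  have h : PySem.List.enumerate (t0 :: rest) = (0, t0) :: PySem.List.enumerate rest 1 := rfl
  rw [h, List.foldl_cons]
  norm_num

theorem ports_agree (ld : List (Int × List (String × Int))) :
    get_accumulated_traffic ld = get_accumulated_traffic_alt ld := by
  unfold get_accumulated_traffic get_accumulated_traffic_alt
  dsimp only []
  cases hg : PySem.List.pyGet? (PySem.List.sorted (pvToD ld).keys (fun x => x) false) 0 with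
  | none => rfl
  | some t0 =>
  have hdnd : (pvToD ld).keys.Nodup := PySem.Dict.nodup_keys_ofList _
  have hperm := PySem.List.sorted_perm (pvToD ld).keys (fun x => x) false
  have hndts : (PySem.List.sorted (pvToD ld).keys (fun x => x) false).Nodup :=
    (List.Perm.nodup_iff hperm).mpr hdnd
  have hsub : ∀ t ∈ PySem.List.sorted (pvToD ld).keys (fun x => x) false,
      t ∈ keysL (pvToD ld).items := fun t ht => hperm.mem_iff.mp ht
  obtain ⟨rest, hts0⟩ : ∃ rest,
      PySem.List.sorted (pvToD ld).keys (fun x => x) false = t0 :: rest := by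
    cases hc : PySem.List.sorted (pvToD ld).keys (fun x => x) false with
    | nil => rw [hc] at hg; simp [PySem.List.pyGet?, PySem.List.pyIdx?] at hg
    | cons a r =>
      rw [hc] at hg
      have : a = t0 := by simpa [PySem.List.pyGet?, PySem.List.pyIdx?] using hg
      exact ⟨r, by rw [this]⟩
  have ht0 : (PySem.List.sorted (pvToD ld).keys (fun x => x) false).head? = some t0 := by
    rw [hts0]; rfl
  have hlnd : ((pvToD ld).getD t0 PySem.Dict.empty).keys.Nodup := inner_nodup ld t0
  have hInv0 : ∀ s, (fun s => (pvToD ld).getD s PySem.Dict.empty) s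
      = if s ∈ [t0] ∧ s ≠ t0
        then updT (pvToD ld) (PySem.List.sorted (pvToD ld).keys (fun x => x) false)
          ((pvToD ld).getD t0 PySem.Dict.empty).keys s
        else (pvToD ld).getD s PySem.Dict.empty := by
    intro s
    rw [if_neg]
    rintro ⟨h1, h2⟩
    simp at h1
    exact h2 h1
  obtain ⟨GA, hfoldA, hcharA⟩ := Amain (pvToD ld)
    (PySem.List.sorted (pvToD ld).keys (fun x => x) false)
    ((pvToD ld).getD t0 PySem.Dict.empty).keys hndts hlnd hsub t0 ht0
    rest [t0] (fun s => (pvToD ld).getD s PySem.Dict.empty) (by rw [hts0]; rfl) (by simp) hInv0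
  obtain ⟨GB, hfoldB, hcharB⟩ := Bmain (pvToD ld)
    (PySem.List.sorted (pvToD ld).keys (fun x => x) false) hndts hsub
    ((pvToD ld).getD t0 PySem.Dict.empty).keys (fun s => (pvToD ld).getD s PySem.Dict.empty)
  rw [← d_eq_Mp (pvToD ld) hdnd] at hfoldA hfoldB
  have hcast : ((([t0] : List Int)).length : Int) = 1 := by norm_num
  rw [hcast] at hfoldA
  rw [hts0] at hfoldA hfoldB hcharA hcharB
  dsimp only []
  rw [hts0, A_drop_first, hfoldA, hfoldB]
  simp only [Mp, MpL, List.map_map]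
  apply List.map_congr_left
  intro p hp
  have hk : p.1 ∈ (pvToD ld).keys := List.mem_map_of_mem hp
  have hkts : p.1 ∈ PySem.List.sorted (pvToD ld).keys (fun x => x) false :=
    hperm.mem_iff.mpr hk
  have hkts2 : p.1 ∈ t0 :: rest := by
    have h := hkts; rw [hts0] at h; exact h
  have hGAB : GA p.1 = GB p.1 := by
    rw [hcharA p.1, hcharB p.1]
    by_cases he : p.1 = t0
    · rw [if_neg (by rintro ⟨_, h2⟩; exact h2 he), if_pos hkts2]
      rw [he]
      symm
      apply foldl_insert_id _ _ _ hlnd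
      intro l hl
      have hnn : ((pvToD ld).getD t0 PySem.Dict.empty).get? l ≠ none := by
        intro hno
        rw [PySem.Dict.get?_eq_none_iff_not_mem_keys] at hno
        exact hno hl
      obtain ⟨v, hv⟩ := Option.ne_none_iff_exists'.mp hnn
      rw [hv]
      rw [valT_head _ _ _ _ (by rfl : (t0 :: rest).head? = some t0)]
      rw [PySem.Dict.getD_of_get?_eq_some _ _ hv]
    · rw [if_pos ⟨by simpa using hkts2, he⟩, if_pos hkts2]
      rfl
  simp [Function.comp, hGAB]

-- ===== VERDICT (by name: the statement is the Claim_ definition above) =====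
theorem get_accumulated_traffic_spec : Claim_equal_get_accumulated_traffic := by
  intro ld _ _
  unfold Spec_get_accumulated_traffic
  exact ports_agree ld
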